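-- pv_equiv track=rewrite | github.com/danielkim1129/GateGuide-UI | main.py | sign_bounding
-- ===== SOURCE A (Python) =====
-- def sign_bounding(boxes, frame_width, frame_height, left_expansion=250, right_expansion=500, top_expansion=150, bottom_expansion=300):
--     if not boxes:
--         return []
--
--     x1 = min(box[0] for box in boxes)
--     y1 = min(box[1] for box in boxes)
--     x2 = max(box[2] for box in boxes)
--     y2 = max(box[3] for box in boxes)
--
--     expanded_x1 = max(0, x1 - left_expansion)
--     expanded_y1 = max(0, y1 - top_expansion)
--     expanded_x2 = min(frame_width, x2 + right_expansion)
--     expanded_y2 = min(frame_height, y2 + bottom_expansion)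
--
--     return [(expanded_x1, expanded_y1, expanded_x2, expanded_y2)]
-- ===== SOURCE B (Python) =====
-- def sign_bounding(boxes, frame_width, frame_height, left_expansion=250, right_expansion=500, top_expansion=150, bottom_expansion=300):
--     if not boxes:
--         return []
--
--     def hull(lo, hi):
--         # divide and conquer: union box of boxes[lo:hi] (hi > lo)
--         if hi - lo == 1:
--             return boxes[lo]
--         mid = (lo + hi) // 2
--         ax1, ay1, ax2, ay2 = hull(lo, mid)
--         bx1, by1, bx2, by2 = hull(mid, hi)
--         return (min(ax1, bx1), min(ay1, by1), max(ax2, bx2), max(ay2, by2))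
--
--     x1, y1, x2, y2 = hull(0, len(boxes))
--     return [(max(0, x1 - left_expansion), max(0, y1 - top_expansion),
--              min(frame_width, x2 + right_expansion),
--              min(frame_height, y2 + bottom_expansion))]
-- ===== Notes on version B (the rewrite author's own statement) =====
-- stated objective: alternative
-- what changed: Replaces A's four linear min/max generator passes with a divide-and-conquer tree reduction: the list is recursively split in half, each half's union box is computed, and the halves are merged with an associative box-union operation.
import Mathlib
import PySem

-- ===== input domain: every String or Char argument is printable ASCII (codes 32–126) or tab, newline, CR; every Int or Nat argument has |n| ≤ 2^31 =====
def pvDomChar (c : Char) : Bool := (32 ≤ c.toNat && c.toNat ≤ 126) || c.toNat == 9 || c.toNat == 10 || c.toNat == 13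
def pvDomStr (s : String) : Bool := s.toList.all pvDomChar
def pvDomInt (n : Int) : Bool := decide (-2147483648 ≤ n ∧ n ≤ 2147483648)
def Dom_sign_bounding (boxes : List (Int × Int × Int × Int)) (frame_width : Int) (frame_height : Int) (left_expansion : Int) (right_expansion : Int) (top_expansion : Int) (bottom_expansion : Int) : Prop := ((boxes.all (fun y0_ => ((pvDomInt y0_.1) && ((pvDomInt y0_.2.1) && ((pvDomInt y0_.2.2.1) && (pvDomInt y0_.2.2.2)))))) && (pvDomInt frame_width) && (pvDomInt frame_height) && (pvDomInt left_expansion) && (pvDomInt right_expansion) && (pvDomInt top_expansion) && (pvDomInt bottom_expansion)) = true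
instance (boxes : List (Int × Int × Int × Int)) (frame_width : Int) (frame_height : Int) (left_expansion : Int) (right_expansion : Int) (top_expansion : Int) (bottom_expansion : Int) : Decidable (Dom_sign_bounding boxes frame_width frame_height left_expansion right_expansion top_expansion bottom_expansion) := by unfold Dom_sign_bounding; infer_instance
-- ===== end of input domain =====

-- B replaces A's four linear min/max passes with a divide-and-conquer tree reduction
-- merging half-hulls with an associative box-union (alternative algorithm, same cost).

-- ===== PORT A =====
def sign_bounding (boxes : List (Int × Int × Int × Int)) (frame_width : Int) (frame_height : Int) (left_expansion : Int) (right_expansion : Int) (top_expansion : Int) (bottom_expansion : Int) : List (Int × Int × Int × Int) :=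
  if boxes = [] then []
  else
    let x1 := (PySem.List.min? (boxes.map (fun box => box.1)) (fun y => y)).getD 0
    let y1 := (PySem.List.min? (boxes.map (fun box => box.2.1)) (fun y => y)).getD 0
    let x2 := (PySem.List.max? (boxes.map (fun box => box.2.2.1)) (fun y => y)).getD 0
    let y2 := (PySem.List.max? (boxes.map (fun box => box.2.2.2)) (fun y => y)).getD 0
    let expanded_x1 := max 0 (x1 - left_expansion)
    let expanded_y1 := max 0 (y1 - top_expansion)
    let expanded_x2 := min frame_width (x2 + right_expansion)
    let expanded_y2 := min frame_height (y2 + bottom_expansion)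
    [(expanded_x1, expanded_y1, expanded_x2, expanded_y2)]

-- ===== PORT B =====
-- box union: componentwise min/min/max/max of two boxes
def sbMerge (u v : Int × Int × Int × Int) : Int × Int × Int × Int :=
  (min u.1 v.1, min u.2.1 v.2.1, max u.2.2.1 v.2.2.1, max u.2.2.2 v.2.2.2)

-- divide-and-conquer union box of a nonempty list (Source B's hull; [] unreachable)
def sbHull : List (Int × Int × Int × Int) → Int × Int × Int × Int
  | [] => (0, 0, 0, 0)
  | [b] => b
  | a :: b :: rest =>
      let l := a :: b :: rest
      sbMerge (sbHull (l.take (l.length / 2))) (sbHull (l.drop (l.length / 2)))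
termination_by l => l.length
decreasing_by
  · simp [List.length_take]; omega
  · simp; omega

def sign_bounding_alt (boxes : List (Int × Int × Int × Int)) (frame_width : Int) (frame_height : Int) (left_expansion : Int) (right_expansion : Int) (top_expansion : Int) (bottom_expansion : Int) : List (Int × Int × Int × Int) :=
  match boxes with
  | [] => []
  | _ =>
      let r := sbHull boxes
      [(max 0 (r.1 - left_expansion), max 0 (r.2.1 - top_expansion),
        min frame_width (r.2.2.1 + right_expansion), min frame_height (r.2.2.2 + bottom_expansion))]

-- ===== PRECONDITION & SPEC =====
def Spec_sign_bounding (boxes : List (Int × Int × Int × Int)) (frame_width : Int) (frame_height : Int) (left_expansion : Int) (right_expansion : Int) (top_expansion : Int) (bottom_expansion : Int) (out : List (Int × Int × Int × Int)) : Prop := out = sign_bounding_alt boxes frame_width frame_height left_expansion right_expansion top_expansion bottom_expansion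
instance (boxes : List (Int × Int × Int × Int)) (frame_width : Int) (frame_height : Int) (left_expansion : Int) (right_expansion : Int) (top_expansion : Int) (bottom_expansion : Int) (out : List (Int × Int × Int × Int)) : Decidable (Spec_sign_bounding boxes frame_width frame_height left_expansion right_expansion top_expansion bottom_expansion out) := by unfold Spec_sign_bounding; infer_instance

-- ===== CLAIM =====
def Claim_equal_sign_bounding : Prop := ∀ (boxes : List (Int × Int × Int × Int)) (frame_width : Int) (frame_height : Int) (left_expansion : Int) (right_expansion : Int) (top_expansion : Int) (bottom_expansion : Int), Dom_sign_bounding boxes frame_width frame_height left_expansion right_expansion top_expansion bottom_expansion → Spec_sign_bounding boxes frame_width frame_height left_expansion right_expansion top_expansion bottom_expansion (sign_bounding boxes frame_width frame_height left_expansion right_expansion top_expansion bottom_expansion)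

-- ===== LEMMAS AND PROOFS =====
-- linear characterisation of the union box of a nonempty list
def sbSpecL : List (Int × Int × Int × Int) → Int × Int × Int × Int
  | [] => (0, 0, 0, 0)
  | a :: t =>
      ((t.map (fun b => b.1)).foldl min a.1,
       (t.map (fun b => b.2.1)).foldl min a.2.1,
       (t.map (fun b => b.2.2.1)).foldl max a.2.2.1,
       (t.map (fun b => b.2.2.2)).foldl max a.2.2.2)

lemma foldl_min_pull (zs : List Int) : ∀ (x y : Int), zs.foldl min (min x y) = min x (zs.foldl min y) := by
  induction zs with
  | nil => intro x y; rfl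
  | cons z zs ih =>
      intro x y
      simp only [List.foldl_cons, min_assoc, ih]

lemma foldl_max_pull (zs : List Int) : ∀ (x y : Int), zs.foldl max (max x y) = max x (zs.foldl max y) := by
  induction zs with
  | nil => intro x y; rfl
  | cons z zs ih =>
      intro x y
      simp only [List.foldl_cons, max_assoc, ih]

lemma sbSpecL_append (l r : List (Int × Int × Int × Int)) (hl : l ≠ []) (hr : r ≠ []) :
    sbSpecL (l ++ r) = sbMerge (sbSpecL l) (sbSpecL r) := by
  obtain ⟨a, t, rfl⟩ := List.exists_cons_of_ne_nil hl
  obtain ⟨c, s, rfl⟩ := List.exists_cons_of_ne_nil hr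
  simp only [sbSpecL, sbMerge, List.cons_append, List.map_append, List.map_cons,
    List.foldl_append, List.foldl_cons]
  rw [foldl_min_pull, foldl_min_pull, foldl_max_pull, foldl_max_pull]

lemma sbHull_eq_spec : ∀ (n : ℕ) (l : List (Int × Int × Int × Int)), l.length ≤ n → l ≠ [] → sbHull l = sbSpecL l := by
  intro n
  induction n with
  | zero => intro l hlen hne; cases l <;> simp_all
  | succ n ih =>
      intro l hlen hne
      match l with
      | [a] => simp [sbHull, sbSpecL]
      | [] => exact absurd rfl hne
      | a :: b :: rest =>
          have hlen2 : 2 ≤ (a :: b :: rest).length := by simp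
          have hm1 : 1 ≤ (a :: b :: rest).length / 2 := by omega
          have hmlt : (a :: b :: rest).length / 2 < (a :: b :: rest).length := by omega
          have htake : ((a :: b :: rest).take ((a :: b :: rest).length / 2)).length = (a :: b :: rest).length / 2 := by
            simp [List.length_take]; omega
          have hdrop : ((a :: b :: rest).drop ((a :: b :: rest).length / 2)).length = (a :: b :: rest).length - (a :: b :: rest).length / 2 := by
            simp
          have htne : (a :: b :: rest).take ((a :: b :: rest).length / 2) ≠ [] := by
            intro h; rw [h] at htake; simp at htake; omega
          have hdne : (a :: b :: rest).drop ((a :: b :: rest).length / 2) ≠ [] := by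
            intro h; rw [h] at hdrop; simp at hdrop; omega
          have hlenl : (a :: b :: rest).length ≤ n + 1 := hlen
          have e1 : sbHull ((a :: b :: rest).take ((a :: b :: rest).length / 2)) = sbSpecL ((a :: b :: rest).take ((a :: b :: rest).length / 2)) := by
            apply ih _ _ htne
            omega
          have e2 : sbHull ((a :: b :: rest).drop ((a :: b :: rest).length / 2)) = sbSpecL ((a :: b :: rest).drop ((a :: b :: rest).length / 2)) := by
            apply ih _ _ hdne
            omega
          rw [show sbHull (a :: b :: rest) = sbMerge (sbHull ((a :: b :: rest).take ((a :: b :: rest).length / 2))) (sbHull ((a :: b :: rest).drop ((a :: b :: rest).length / 2))) from by rw [sbHull]]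
          rw [e1, e2, ← sbSpecL_append _ _ htne hdne, List.take_append_drop]

-- ===== VERDICT =====
theorem sign_bounding_spec : Claim_equal_sign_bounding := by
  intro boxes fw fh le re te be _
  unfold Spec_sign_bounding
  cases boxes with
  | nil => simp [sign_bounding, sign_bounding_alt]
  | cons hd tl =>
      have h := sbHull_eq_spec (hd :: tl).length (hd :: tl) le_rfl (by simp)
      simp only [sign_bounding, sign_bounding_alt, h, sbSpecL,
        List.map_cons, PySem.List.min?_id_cons, PySem.List.max?_id_cons,
        if_neg (List.cons_ne_nil hd tl), Option.getD_some]
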